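-- pv_equiv track=rewrite | github.com/jngaravitoc/XMC-Atlas | scripts/exp_pipeline/sanity_checks.py | check_monotonic_contiguous_snapshots
-- ===== SOURCE A (Python) =====
-- def check_monotonic_contiguous_snapshots(suffixes):
--     """
--     Check that suffixes are integer-valued, monotonic, and contiguous.
--
--     Parameters
--     ----------
--     suffixes : sequence of str or int
--         Snapshot suffixes (e.g. ["000", "001", "002"]).
--
--     Returns
--     -------
--     ok : bool
--         True if suffixes are valid, False otherwise.
--     missing : list of int
--         Missing integer values (empty if none).
--     """
--     try:
--         values = sorted(int(s) for s in suffixes)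
--     except ValueError as exc:
--         raise ValueError("All suffixes must be convertible to integers.") from exc
--
--     if len(values) == 0:
--         return True, []
--
--     expected = list(range(values[0], values[-1] + 1))
--     missing = sorted(set(expected) - set(values))
--
--     ok = len(missing) == 0
--     return ok, missing
-- ===== SOURCE B (Python) =====
-- def check_monotonic_contiguous_snapshots(suffixes):
--     try:
--         values = sorted(int(s) for s in suffixes)
--     except ValueError as exc:
--         raise ValueError("All suffixes must be convertible to integers.") from exc
--
--     if not values:
--         return True, []
--
--     missing = []
--     prev = values[0]
--     for cur in values[1:]:
--         missing.extend(range(prev + 1, cur))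
--         prev = cur
--     return len(missing) == 0, missing
-- ===== Notes on version B (the rewrite author's own statement) =====
-- stated objective: alternative
-- what changed: B replaces A's expected-range list and the two set objects with a single pass over adjacent sorted pairs, collecting each gap range(prev+1, cur) directly.
import Mathlib
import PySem

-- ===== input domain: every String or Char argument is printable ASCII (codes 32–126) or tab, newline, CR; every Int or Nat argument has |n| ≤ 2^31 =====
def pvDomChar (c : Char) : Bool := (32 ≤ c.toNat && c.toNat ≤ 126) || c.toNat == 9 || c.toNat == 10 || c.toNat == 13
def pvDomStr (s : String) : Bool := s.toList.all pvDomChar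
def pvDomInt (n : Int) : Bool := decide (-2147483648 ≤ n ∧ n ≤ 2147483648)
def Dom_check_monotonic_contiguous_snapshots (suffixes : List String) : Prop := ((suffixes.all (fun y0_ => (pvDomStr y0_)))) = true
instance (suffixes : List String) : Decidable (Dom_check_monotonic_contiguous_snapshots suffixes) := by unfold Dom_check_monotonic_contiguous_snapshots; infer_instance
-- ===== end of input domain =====

-- B replaces A's expected range plus two sets by one pass over adjacent sorted pairs collecting each gap directly (alternative decomposition).

-- ===== PORT A =====
def check_monotonic_contiguous_snapshots (suffixes : List String) : Bool × List Int :=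
  match suffixes.mapM PySem.Int.ofStr? with
  | none => (false, [])  -- int(s) raised ValueError; these inputs are outside Pre_
  | some vs =>
    let values := PySem.List.sorted vs (fun x => x) false
    if values.length = 0 then (true, [])
    else
      let expected := PySem.List.pyRange (PySem.List.pyGetD values 0 0) (PySem.List.pyGetD values (-1) 0 + 1) 1
      let missing := PySem.List.sorted (PySem.Set.diff (PySem.Set.ofList expected) (PySem.Set.ofList values)) (fun x => x) false
      let ok := missing.length == 0
      (ok, missing)

-- ===== PORT B =====
-- the loop 'for cur in values[1:]: missing.extend(range(prev+1, cur)); prev = cur'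
def gapsAux : Int → List Int → List Int
  | _, [] => []
  | prev, cur :: t => PySem.List.pyRange (prev + 1) cur 1 ++ gapsAux cur t

def check_monotonic_contiguous_snapshots_alt (suffixes : List String) : Bool × List Int :=
  match suffixes.mapM PySem.Int.ofStr? with
  | none => (false, [])  -- int(s) raised ValueError; these inputs are outside Pre_
  | some vs =>
    match PySem.List.sorted vs (fun x => x) false with
    | [] => (true, [])
    | v :: rest =>
      let missing := gapsAux v rest
      (missing.length == 0, missing)

-- ===== PRECONDITION & SPEC =====
-- Pre_ excludes exactly the inputs where some suffix is not int-convertible: there A raises ValueError.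
def Pre_check_monotonic_contiguous_snapshots (suffixes : List String) : Prop :=
  (suffixes.all (fun s => (PySem.Int.ofStr? s).isSome)) = true
instance (suffixes : List String) : Decidable (Pre_check_monotonic_contiguous_snapshots suffixes) := by unfold Pre_check_monotonic_contiguous_snapshots; infer_instance

def pvWitness_check_monotonic_contiguous_snapshots : List String := ["000", "003", "001"]

def Spec_check_monotonic_contiguous_snapshots (suffixes : List String) (out : Bool × List Int) : Prop := out = check_monotonic_contiguous_snapshots_alt suffixes
instance (suffixes : List String) (out : Bool × List Int) : Decidable (Spec_check_monotonic_contiguous_snapshots suffixes out) := by unfold Spec_check_monotonic_contiguous_snapshots; infer_instance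

-- ===== CLAIM (what is proved, stated in full; the proofs are below) =====
def Claim_equal_check_monotonic_contiguous_snapshots : Prop := ∀ (suffixes : List String), Dom_check_monotonic_contiguous_snapshots suffixes → Pre_check_monotonic_contiguous_snapshots suffixes → Spec_check_monotonic_contiguous_snapshots suffixes (check_monotonic_contiguous_snapshots suffixes)

-- ===== LEMMAS AND PROOFS =====

-- the last element of a ≤-sorted nonempty list bounds its head
lemma le_getLastD_of_pairwise (c : Int) (t : List Int) (h : (c :: t).Pairwise (· ≤ ·)) :
    c ≤ t.getLastD c := by
  induction t generalizing c with
  | nil => simp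
  | cons d t' ih =>
    rcases List.pairwise_cons.mp h with ⟨hcd, h'⟩
    have := ih d h'
    have hcd' : c ≤ d := hcd d (by simp)
    simp only [List.getLastD_cons]
    omega

lemma mem_gapsAux (prev : Int) (l : List Int) (x : Int) (h : (prev :: l).Pairwise (· ≤ ·)) :
    x ∈ gapsAux prev l ↔ (prev ≤ x ∧ x ≤ l.getLastD prev ∧ x ∉ prev :: l) := by
  induction l generalizing prev with
  | nil => simp [gapsAux]; omega
  | cons c t ih =>
    rcases List.pairwise_cons.mp h with ⟨hpc, h2⟩
    have h1 : prev ≤ c := hpc c (by simp)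
    have hmem : ∀ y ∈ t, c ≤ y := (List.pairwise_cons.mp h2).1
    have hclast : c ≤ t.getLastD c := le_getLastD_of_pairwise c t h2
    simp only [gapsAux, List.mem_append, PySem.List.mem_pyRange_one, ih c h2,
      List.mem_cons, List.getLastD_cons, not_or]
    simp only [List.getLastD_eq_getLast?] at hclast ⊢
    by_cases hxt : x ∈ t
    · have := hmem x hxt
      simp [hxt]
      omega
    · simp [hxt]
      omega

lemma gapsAux_pairwise (prev : Int) (l : List Int) (h : (prev :: l).Pairwise (· ≤ ·)) :
    (gapsAux prev l).Pairwise (· < ·) := by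
  induction l generalizing prev with
  | nil => simp [gapsAux]
  | cons c t ih =>
    rcases List.pairwise_cons.mp h with ⟨_, h2⟩
    simp only [gapsAux]
    rw [List.pairwise_append]
    refine ⟨PySem.List.pairwise_lt_pyRange_one _ _, ih c h2, ?_⟩
    intro a ha b hb
    have ha' : a < c := (PySem.List.mem_pyRange_one.mp ha).2
    have hb' := (mem_gapsAux c t b h2).mp hb
    have : b ≠ c := fun hbc => hb'.2.2 (by simp [hbc])
    omega

-- A's missing list equals B's missing list on the sorted values
lemma missing_eq (v : Int) (rest : List Int) (h : (v :: rest).Pairwise (· ≤ ·)) :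
    PySem.List.sorted (PySem.Set.diff (PySem.Set.ofList (PySem.List.pyRange v (rest.getLastD v + 1) 1)) (PySem.Set.ofList (v :: rest))) (fun x => x) false = gapsAux v rest := by
  apply PySem.List.sorted_eq_of_perm_of_pairwise_lt
  · rw [List.perm_ext_iff_of_nodup
      ((gapsAux_pairwise v rest h).imp (fun hab => ne_of_lt hab))
      (PySem.Set.nodup_diff _ _ (PySem.Set.nodup_ofList _))]
    intro x
    rw [mem_gapsAux v rest x h, PySem.Set.mem_diff, PySem.Set.mem_ofList, PySem.Set.mem_ofList,
      PySem.List.mem_pyRange_one]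
    constructor
    · rintro ⟨h1, h2, h3⟩; exact ⟨⟨h1, by omega⟩, h3⟩
    · rintro ⟨⟨h1, h2⟩, h3⟩; exact ⟨h1, by omega, h3⟩
  · exact gapsAux_pairwise v rest h

lemma pyGetD_neg_one_cons (v : Int) (rest : List Int) (d : Int) :
    PySem.List.pyGetD (v :: rest) (-1) d = rest.getLastD v := by
  induction rest generalizing v with
  | nil => simp [PySem.List.pyGetD, PySem.List.pyGet?, PySem.List.pyIdx?]
  | cons c t ih =>
    have h1 : PySem.List.pyGetD (v :: c :: t) (-1) d = PySem.List.pyGetD (c :: t) (-1) d := by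
      simp [PySem.List.pyGetD, PySem.List.pyGet?, PySem.List.pyIdx?]
      omega
    rw [h1, ih, List.getLastD_cons]

-- ===== VERDICT (by name: the statement is the Claim_ definition above) =====
theorem check_monotonic_contiguous_snapshots_spec : Claim_equal_check_monotonic_contiguous_snapshots := by
  intro suffixes _ _
  unfold Spec_check_monotonic_contiguous_snapshots
  unfold check_monotonic_contiguous_snapshots check_monotonic_contiguous_snapshots_alt
  cases hm : suffixes.mapM PySem.Int.ofStr? with
  | none => rfl
  | some vs =>
    simp only []
    have hsorted := PySem.List.sorted_pairwise vs (fun x => x)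
    cases hv : PySem.List.sorted vs (fun x => x) false with
    | nil => simp
    | cons v rest =>
      rw [hv] at hsorted
      have hpw : (v :: rest).Pairwise (· ≤ ·) := hsorted
      have h0 : PySem.List.pyGetD (v :: rest) 0 0 = v := by
        simp [PySem.List.pyGetD, PySem.List.pyGet?, PySem.List.pyIdx?]
      simp only [List.length_cons, Nat.succ_ne_zero, if_false, h0,
        pyGetD_neg_one_cons, missing_eq v rest hpw]
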